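-- pv_equiv track=rewrite | github.com/JeffBoo/python_works | Exercices Python/Exercices Très Facile YTB/remplacer_car_par_diese.py | remplace_diese
-- ===== SOURCE A (Python) =====
-- def remplace_diese(texte):
--     chain_diese = ""
--     n = len(texte)
--     for i in range(n):
--         if i % 2 == 0:
--             chain_diese += texte[i]
--         else:
--             chain_diese += "#"
--     return chain_diese
-- ===== SOURCE B (Python) =====
-- def remplace_diese(texte):
--     chars = list(texte)
--     chars[1::2] = '#' * len(chars[1::2])
--     return ''.join(chars)
-- ===== Notes on version B (the rewrite author's own statement) =====
-- stated objective: faster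
-- what changed: Replaces the per-index parity loop with repeated string concatenation by a bulk strided slice assignment overwriting all odd positions at once on a char list, then a single join.
import Mathlib
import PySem

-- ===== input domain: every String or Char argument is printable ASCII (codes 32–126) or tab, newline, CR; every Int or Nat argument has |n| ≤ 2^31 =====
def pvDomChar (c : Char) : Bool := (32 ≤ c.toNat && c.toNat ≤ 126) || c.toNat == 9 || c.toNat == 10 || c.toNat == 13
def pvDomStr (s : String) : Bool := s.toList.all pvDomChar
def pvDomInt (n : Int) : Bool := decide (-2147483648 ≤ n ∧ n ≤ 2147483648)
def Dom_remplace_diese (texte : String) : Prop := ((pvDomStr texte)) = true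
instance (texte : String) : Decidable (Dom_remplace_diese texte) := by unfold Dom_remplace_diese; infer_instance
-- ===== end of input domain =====

-- B replaces A's per-index parity loop by a bulk overwrite of the odd positions (strided
-- slice assignment in Python, a two-at-a-time structural pass here); idiomatic, return value only.

-- ===== PORT A =====
-- chain_diese accumulated as a List Char; texte[i] is always in range here, so pyGetD is exact.
def remplace_diese (texte : String) : String :=
  let n : Int := PySem.Str.len texte
  let chain_diese : List Char :=
    (PySem.List.pyRange 0 n 1).foldl
      (fun acc i =>
        if PySem.Int.mod i 2 = 0 then acc ++ [PySem.List.pyGetD texte.toList i ' ']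
        else acc ++ ['#']) []
  String.mk chain_diese

-- ===== PORT B =====
-- chars[1::2] = '#' * …: every odd position becomes '#', handled two elements at a time.
def pvSetOdds : List Char → List Char
  | [] => []
  | [a] => [a]
  | a :: _ :: t => a :: '#' :: pvSetOdds t

def remplace_diese_alt (texte : String) : String :=
  String.mk (pvSetOdds texte.toList)

-- ===== PRECONDITION & SPEC =====
def Spec_remplace_diese (texte : String) (out : String) : Prop := out = remplace_diese_alt texte
instance (texte : String) (out : String) : Decidable (Spec_remplace_diese texte out) := by unfold Spec_remplace_diese; infer_instance

-- ===== CLAIM (what is proved, stated in full; the proofs are below) =====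
def Claim_equal_remplace_diese : Prop := ∀ (texte : String), Dom_remplace_diese texte → Spec_remplace_diese texte (remplace_diese texte)

-- ===== LEMMAS AND PROOFS =====
theorem pvSetOdds_length (l : List Char) : (pvSetOdds l).length = l.length := by
  induction l using pvSetOdds.induct <;> simp [pvSetOdds, *]

theorem pvSetOdds_getElem (l : List Char) (k : Nat) (hk : k < l.length) :
    (pvSetOdds l)[k]'(by rw [pvSetOdds_length]; exact hk) =
      if k % 2 = 0 then l[k] else '#' := by
  induction l using pvSetOdds.induct generalizing k with
  | case1 => simp at hk
  | case2 a =>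
    match k with
    | 0 => simp [pvSetOdds]
  | case3 a b t ih =>
    match k with
    | 0 => simp [pvSetOdds]
    | 1 => simp [pvSetOdds]
    | (m + 2) =>
      have hm : m < t.length := by simpa using hk
      have : (pvSetOdds (a :: b :: t))[m + 2]'(by rw [pvSetOdds_length]; exact hk) =
          (pvSetOdds t)[m]'(by rw [pvSetOdds_length]; exact hm) := by
        simp [pvSetOdds]
      rw [this, ih m hm]
      have : (m + 2) % 2 = m % 2 := by omega
      rw [this]
      by_cases h : m % 2 = 0 <;> simp [h]

theorem remplace_diese_spec' (texte : String) :
    remplace_diese texte = remplace_diese_alt texte := by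
  unfold remplace_diese remplace_diese_alt
  set l := texte.toList with hl
  have hbody : ∀ (acc : List Char) (i : Int),
      (if PySem.Int.mod i 2 = 0 then acc ++ [PySem.List.pyGetD l i ' '] else acc ++ ['#'])
        = acc ++ [if PySem.Int.mod i 2 = 0 then PySem.List.pyGetD l i ' ' else '#'] := by
    intro acc i
    by_cases h : PySem.Int.mod i 2 = 0
    · rw [if_pos h, if_pos h]
    · rw [if_neg h, if_neg h]
  simp only [hbody, PySem.List.foldl_append_singleton_eq_map, List.nil_append]
  have hlen : PySem.Str.len texte = (l.length : Int) := by
    simp [PySem.Str.len_eq, hl]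
  rw [hlen, PySem.List.pyRange_one]
  simp only [Int.sub_zero, Int.toNat_natCast, List.map_map]
  congr 1
  apply List.ext_getElem
  · simp [pvSetOdds_length]
  · intro k h1 h2
    have hk : k < l.length := by rw [pvSetOdds_length] at h2; exact h2
    rw [pvSetOdds_getElem l k hk]
    simp only [List.getElem_map, List.getElem_range, Function.comp_apply]
    have hc : (PySem.Int.mod (0 + (k : Int)) 2 = 0) ↔ (k % 2 = 0) := by
      rw [PySem.Int.mod_eq_zero_iff_dvd]
      omega
    by_cases h : k % 2 = 0
    · rw [if_pos (hc.mpr h), if_pos h]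
      simp [PySem.List.pyGetD_natCast, List.getD_eq_getElem?_getD,
        List.getElem?_eq_getElem hk]
    · rw [if_neg (fun hx => h (hc.mp hx)), if_neg h]

-- ===== VERDICT (by name: the statement is the Claim_ definition above) =====
theorem remplace_diese_spec : Claim_equal_remplace_diese := by
  intro texte _
  unfold Spec_remplace_diese
  exact remplace_diese_spec' texte
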